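-- pv_equiv track=rewrite | github.com/HristoKaranikolov/Software-Academy-Course | python_fundamentals/homework_2023_1_23/loops/task_17.py | give_all_digits_from_1_to_number
-- ===== SOURCE A (Python) =====
-- def give_all_digits_from_1_to_number(num):
--     result = []
--     for i in range(1, num + 1):
--         result.append(i)
--
--     final_result = []
--     multiple_digit_num = False
--     for el in result:
--         if len(str(el)) > 0:
--             multiple_digit_num = True
--             for j in str(el):
--                 final_result.append(int(j))
--
--         if not multiple_digit_num:
--             final_result.append(el)
--
--     return final_result
-- ===== SOURCE B (Python) =====
-- def give_all_digits_from_1_to_number(num):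
--     out = []
--     for i in range(1, num + 1):
--         ds = []
--         while i > 0:
--             ds.append(i % 10)
--             i //= 10
--         ds.reverse()
--         out.extend(ds)
--     return out
-- ===== Notes on version B (the rewrite author's own statement) =====
-- stated objective: faster
-- what changed: Digits are extracted arithmetically (repeated % 10 and //= 10, then reversed) in one pass without building the 1..num list or any str()/int() conversions, and without A's dead multiple_digit_num flag.
import Mathlib
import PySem

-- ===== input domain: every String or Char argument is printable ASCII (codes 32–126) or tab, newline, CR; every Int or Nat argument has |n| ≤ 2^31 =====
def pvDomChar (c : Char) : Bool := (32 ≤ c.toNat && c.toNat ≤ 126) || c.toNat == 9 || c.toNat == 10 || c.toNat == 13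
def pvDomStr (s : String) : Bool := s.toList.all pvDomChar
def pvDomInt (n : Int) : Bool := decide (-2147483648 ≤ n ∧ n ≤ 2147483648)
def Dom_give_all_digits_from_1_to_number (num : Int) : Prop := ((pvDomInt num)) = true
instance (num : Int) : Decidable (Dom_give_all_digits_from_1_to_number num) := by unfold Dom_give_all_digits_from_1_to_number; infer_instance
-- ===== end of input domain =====

-- B replaces A's str()/int() digit splitting (and its dead flag) by arithmetic %10 // 10 extraction; measured constant-factor faster.

-- ===== PORT A =====
-- int(j) for a single char j; the .getD 0 default is unreachable here (every el iterated is ≥ 1, so str(el) has only digit chars and int(j) never raises).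
def pvChInt (j : Char) : Int := (PySem.Int.ofChars? [j]).getD 0

-- the body of A's second loop over `result` (state = (multiple_digit_num, final_result))
def pvStepA (st : Bool × List Int) (el : Int) : Bool × List Int :=
  let s := PySem.Int.toChars el        -- str(el); via PySem.Str.len_eq, s.length is len(str(el))
  -- if len(str(el)) > 0: multiple_digit_num = True; for j in str(el): final_result.append(int(j))
  let st := if s.length > 0 then (true, s.foldl (fun acc j => acc ++ [pvChInt j]) st.2) else st
  -- if not multiple_digit_num: final_result.append(el)
  if !st.1 then (st.1, st.2 ++ [el]) else st

def give_all_digits_from_1_to_number (num : Int) : List Int :=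
  -- result = []; for i in range(1, num+1): result.append(i)
  let result : List Int := (PySem.List.pyRange 1 (num + 1) 1).foldl (fun acc i => acc ++ [i]) []
  (result.foldl pvStepA (false, [])).2

-- ===== PORT B =====
-- ds = []; while i > 0: ds.append(i % 10); i //= 10
def pvCollect (i : Int) : List Int :=
  if _h : 0 < i then PySem.Int.mod i 10 :: pvCollect (PySem.Int.floordiv i 10) else []
termination_by i.toNat
decreasing_by
  rw [PySem.Int.floordiv_eq_ediv_of_pos (by norm_num : (0:Int) < 10)]
  omega

def give_all_digits_from_1_to_number_alt (num : Int) : List Int :=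
  (PySem.List.pyRange 1 (num + 1) 1).foldl
    (fun out i => out ++ (pvCollect i).reverse)   -- ds.reverse(); out.extend(ds)
    []

-- ===== PRECONDITION & SPEC =====
def Spec_give_all_digits_from_1_to_number (num : Int) (out : List Int) : Prop := out = give_all_digits_from_1_to_number_alt num
instance (num : Int) (out : List Int) : Decidable (Spec_give_all_digits_from_1_to_number num out) := by unfold Spec_give_all_digits_from_1_to_number; infer_instance

-- ===== CLAIM (what is proved, stated in full; the proofs are below) =====
def Claim_equal_give_all_digits_from_1_to_number : Prop := ∀ (num : Int), Dom_give_all_digits_from_1_to_number num → Spec_give_all_digits_from_1_to_number num (give_all_digits_from_1_to_number num)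

-- ===== LEMMAS AND PROOFS =====

-- proof-side twin of pvCollect on Nat, convenient for induction
def pvCollectNat (n : Nat) : List Int :=
  if n = 0 then [] else ((n % 10 : Nat) : Int) :: pvCollectNat (n / 10)
decreasing_by omega

lemma pvCollect_natCast (n : Nat) : pvCollect (n : Int) = pvCollectNat n := by
  induction n using Nat.strong_induction_on with
  | _ n ih =>
    rw [pvCollect, pvCollectNat]
    by_cases h : n = 0
    · simp [h]
    · have h0 : (0:Int) < (n:Int) := by omega
      rw [dif_pos h0, if_neg h]
      have hm : PySem.Int.mod (n : Int) 10 = ((n % 10 : Nat) : Int) := by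
        exact_mod_cast PySem.Int.mod_natCast n 10
      have hd : PySem.Int.floordiv (n : Int) 10 = ((n / 10 : Nat) : Int) := by
        exact_mod_cast PySem.Int.floordiv_natCast n 10
      rw [hm, hd, ih (n / 10) (by omega)]

lemma pvChInt_digitChar (m : Nat) (h : m < 10) : pvChInt (Nat.digitChar m) = (m : Int) := by
  interval_cases m <;> decide

lemma map_toDigitsCore (n : Nat) : ∀ (f : Nat) (ds : List Char), 0 < n → n ≤ f →
    List.map pvChInt (Nat.toDigitsCore 10 (f + 1) n ds)
      = (pvCollectNat n).reverse ++ List.map pvChInt ds := by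
  induction n using Nat.strong_induction_on with
  | _ n ih =>
    intro f ds hn hf
    rw [Nat.toDigitsCore]
    have hn0 : ¬ n = 0 := by omega
    have hlt : n % 10 < 10 := Nat.mod_lt _ (by omega)
    by_cases h10 : n / 10 = 0
    · simp [h10, pvCollectNat, hn0, pvChInt_digitChar (n % 10) hlt]
    · rw [if_neg h10]
      obtain ⟨f', rfl⟩ : ∃ f', f = f' + 1 := ⟨f - 1, by omega⟩
      rw [ih (n / 10) (by omega) f' (Nat.digitChar (n % 10) :: ds) (by omega) (by omega)]
      have e1 : pvCollectNat n = ((n % 10 : Nat) : Int) :: pvCollectNat (n / 10) := by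
        rw [pvCollectNat, if_neg hn0]
      rw [e1]
      simp [pvChInt_digitChar (n % 10) hlt]

lemma map_toChars_of_pos (el : Int) (h : 1 ≤ el) :
    List.map pvChInt (PySem.Int.toChars el) = (pvCollect el).reverse := by
  obtain ⟨n, rfl⟩ : ∃ n : Nat, el = (n : Int) := ⟨el.toNat, by omega⟩
  have hn : 0 < n := by omega
  have : PySem.Int.toChars (n : Int) = Nat.toDigits 10 n := by
    simp [PySem.Int.toChars, show ¬ ((n:Int) < 0) by omega]
  rw [this, Nat.toDigits, map_toDigitsCore n n [] hn le_rfl, pvCollect_natCast]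
  simp

lemma toChars_ne_nil_of_pos (el : Int) (h : 1 ≤ el) : PySem.Int.toChars el ≠ [] := by
  intro hnil
  have := map_toChars_of_pos el h
  rw [hnil] at this
  have hp : 0 < el := by omega
  rw [pvCollect, dif_pos hp] at this
  simp at this

lemma pvStepA_eq (b : Bool) (fr : List Int) (el : Int) (hel : 1 ≤ el) :
    pvStepA (b, fr) el = (true, fr ++ (pvCollect el).reverse) := by
  have hne := toChars_ne_nil_of_pos el hel
  have hlen : 0 < (PySem.Int.toChars el).length := List.length_pos_iff.mpr hne
  unfold pvStepA
  simp only [if_pos hlen]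
  rw [PySem.List.foldl_append_singleton_eq_map]
  simp [map_toChars_of_pos el hel]

lemma foldl_stepA (l : List Int) :
    ∀ (b : Bool) (fr : List Int), (∀ x ∈ l, 1 ≤ x) →
    (l.foldl pvStepA (b, fr)).2 = l.foldl (fun out i => out ++ (pvCollect i).reverse) fr := by
  induction l with
  | nil => intro b fr _; rfl
  | cons el t iht =>
    intro b fr hmem
    have hel : 1 ≤ el := hmem el (by simp)
    simp only [List.foldl_cons, pvStepA_eq b fr el hel]
    exact iht true _ (fun x hx => hmem x (by simp [hx]))

-- ===== VERDICT (by name: the statement is the Claim_ definition above) =====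
theorem give_all_digits_from_1_to_number_spec : Claim_equal_give_all_digits_from_1_to_number := by
  intro num _
  unfold Spec_give_all_digits_from_1_to_number
  unfold give_all_digits_from_1_to_number give_all_digits_from_1_to_number_alt
  rw [PySem.List.foldl_append_singleton]
  simp only [List.nil_append]
  exact foldl_stepA _ false [] (fun x hx => ((PySem.List.mem_pyRange_one).1 hx).1)
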